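-- pv_equiv track=rewrite | github.com/Gwihwan-Go/Life_box | categorize.py | search
-- ===== SOURCE A (Python) =====
-- def search(target,key_list) :
--     """
--     search target word from key_list
--     key_list is looks like {key : [word1, word2, ...], key2 : [ ...]}
--     input :
--         target(str) : word to change ex) nap, lunch
--         key_list(dict) : looks like {key : [word1, word2, ...], key2 : [ ...]}
--     output :
--         result(str) : changed word ex) 🌙sleep, 🍔food
--     """
--     target = target.lower()
--     result = target
--     for key, word_list in key_list.items() :
--         if target in word_list :
--             result = key
--             break
--     return result
-- ===== SOURCE B (Python) =====
-- def search(target, key_list):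
--     """Reverse-index re-implementation: build word->key map once (first key wins,
--     matching A's break), then a single dict lookup with the target itself as default."""
--     index = {}
--     for key, word_list in key_list.items():
--         for word in word_list:
--             index.setdefault(word, key)
--     target = target.lower()
--     return index.get(target, target)
-- ===== Notes on version B (the rewrite author's own statement) =====
-- stated objective: alternative
-- what changed: Replaces A's scan-with-break over the dict items by building a reverse index word->key with setdefault (first key wins) and doing a single dict lookup with the target as default.
import Mathlib
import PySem

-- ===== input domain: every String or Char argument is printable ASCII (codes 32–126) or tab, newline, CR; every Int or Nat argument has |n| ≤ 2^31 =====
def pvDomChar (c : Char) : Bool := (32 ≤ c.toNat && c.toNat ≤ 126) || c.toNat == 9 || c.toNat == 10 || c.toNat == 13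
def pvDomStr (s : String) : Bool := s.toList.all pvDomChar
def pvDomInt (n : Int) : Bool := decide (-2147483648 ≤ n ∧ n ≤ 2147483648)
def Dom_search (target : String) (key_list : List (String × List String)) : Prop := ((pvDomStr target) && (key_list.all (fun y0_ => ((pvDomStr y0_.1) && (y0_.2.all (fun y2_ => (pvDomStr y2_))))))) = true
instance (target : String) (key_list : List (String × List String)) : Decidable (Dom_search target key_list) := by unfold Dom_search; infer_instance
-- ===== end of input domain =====

-- B builds a reverse word→key index (first key wins) and does one lookup; alternative decomposition, same cost.


-- ===== PORT A =====
-- the for-loop with break: result starts as target, first key whose word_list contains target wins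
def searchLoop (t : String) : List (String × List String) → String
  | [] => t
  | (key, word_list) :: rest =>
    if word_list.contains t then key else searchLoop t rest

def search (target : String) (key_list : List (String × List String)) : String :=
  let t := PySem.Str.lower target
  searchLoop t key_list

-- ===== PORT B =====
-- index.setdefault(word, key) over all items, then one lookup
def buildIndex (key_list : List (String × List String)) : PySem.Dict String String :=
  key_list.foldl (fun d p => p.2.foldl (fun d w => d.setdefault w p.1) d) PySem.Dict.empty

def search_alt (target : String) (key_list : List (String × List String)) : String :=
  let index := buildIndex key_list
  let t := PySem.Str.lower target
  index.getD t t

-- ===== PRECONDITION & SPEC =====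
def Spec_search (target : String) (key_list : List (String × List String)) (out : String) : Prop := out = search_alt target key_list
instance (target : String) (key_list : List (String × List String)) (out : String) : Decidable (Spec_search target key_list out) := by unfold Spec_search; infer_instance

-- ===== CLAIM (what is proved, stated in full; the proofs are below) =====
def Claim_equal_search : Prop := ∀ (target : String) (key_list : List (String × List String)), Dom_search target key_list → Spec_search target key_list (search target key_list)

-- ===== LEMMAS AND PROOFS =====

-- first matching key, as an Option
def firstKey (t : String) : List (String × List String) → Option String
  | [] => none
  | (key, ws) :: rest => if ws.contains t then some key else firstKey t rest

theorem inner_fold_get? (t k : String) (ws : List String) (d : PySem.Dict String String) :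
    (ws.foldl (fun d w => d.setdefault w k) d).get? t
      = (d.get? t).or (if ws.contains t then some k else none) := by
  induction ws generalizing d with
  | nil => simp
  | cons w ws ih =>
    simp only [List.foldl_cons, ih]
    by_cases h : t = w
    · subst h
      rw [PySem.Dict.get?_setdefault_self]
      cases hd : d.get? t <;> simp [Option.or]
    · rw [PySem.Dict.get?_setdefault_of_ne (hne := h)]
      simp [h]

theorem outer_fold_get? (t : String) (kl : List (String × List String))
    (d : PySem.Dict String String) :
    (kl.foldl (fun d p => p.2.foldl (fun d w => d.setdefault w p.1) d) d).get? t
      = (d.get? t).or (firstKey t kl) := by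
  induction kl generalizing d with
  | nil => simp [firstKey]
  | cons p kl ih =>
    simp only [List.foldl_cons, ih, inner_fold_get?, firstKey, Option.or_assoc]
    split <;> rfl

theorem searchLoop_eq (t : String) (kl : List (String × List String)) :
    searchLoop t kl = (firstKey t kl).getD t := by
  induction kl with
  | nil => rfl
  | cons p kl ih =>
    obtain ⟨k, ws⟩ := p
    simp only [searchLoop, firstKey]
    split <;> simp [ih]

-- ===== VERDICT (by name: the statement is the Claim_ definition above) =====
theorem search_spec : Claim_equal_search := by
  intro target key_list _
  unfold Spec_search search search_alt buildIndex
  rw [PySem.Dict.getD_eq_get?_getD, outer_fold_get?, searchLoop_eq]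
  simp
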